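-- pv_equiv track=rewrite | github.com/john35452/GFG_Weekly_Coding_Contest | gfg-weekly-coding-contest-112/What Mean do you Mean.py | IsMean
-- ===== SOURCE A (Python) =====
-- from typing import List
--
-- def IsMean(n : int, k : int, x : int, arr : List[int]) -> bool:
--     # code here
--     target = x * n - sum(arr)
--     pre = set()
--     for val in arr:
--         remain = target - val * (k - 1)
--         if remain in pre:
--             return True
--         pre.add(val * (k - 1))
--     return False
-- ===== SOURCE B (Python) =====
-- from typing import List
--
-- def IsMean(n : int, k : int, x : int, arr : List[int]) -> bool:
--     # sort the transformed values once, then close in with two pointers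
--     target = x * n - sum(arr)
--     b = sorted(v * (k - 1) for v in arr)
--     lo, hi = 0, len(b) - 1
--     while lo < hi:
--         s = b[lo] + b[hi]
--         if s == target:
--             return True
--         if s < target:
--             lo += 1
--         else:
--             hi -= 1
--     return False
-- ===== Notes on version B (the rewrite author's own statement) =====
-- stated objective: alternative
-- what changed: Replaces A's single-pass hash-set membership test with sort-then-two-pointers: map each value to v*(k-1), sort once, and close in from both ends comparing the pair sum against target.
import Mathlib
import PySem

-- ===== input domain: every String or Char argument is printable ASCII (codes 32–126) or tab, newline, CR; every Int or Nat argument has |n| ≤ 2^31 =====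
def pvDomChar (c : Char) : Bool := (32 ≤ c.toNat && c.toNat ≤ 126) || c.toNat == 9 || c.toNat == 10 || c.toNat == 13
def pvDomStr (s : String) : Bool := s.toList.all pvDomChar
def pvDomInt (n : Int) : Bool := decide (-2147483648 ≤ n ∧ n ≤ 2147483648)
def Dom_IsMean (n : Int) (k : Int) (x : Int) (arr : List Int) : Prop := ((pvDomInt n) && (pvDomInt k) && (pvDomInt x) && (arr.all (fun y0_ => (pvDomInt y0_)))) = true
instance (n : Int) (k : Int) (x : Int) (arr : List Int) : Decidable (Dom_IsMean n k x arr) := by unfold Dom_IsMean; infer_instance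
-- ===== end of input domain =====

-- B replaces A's single-pass hash-set pair check by sort-then-two-pointers (alternative algorithm).

-- ===== PORT A =====
-- A's loop: carry the set 'pre' of values v*(k-1) already seen; return True on the first hit.
def IsMeanLoopA (target : Int) (k : Int) (pre : PySem.Set Int) : List Int → Bool
  | [] => false
  | val :: rest =>
    if (target - val * (k - 1)) ∈ pre then true
    else IsMeanLoopA target k (PySem.Set.add pre (val * (k - 1))) rest

def IsMean (n : Int) (k : Int) (x : Int) (arr : List Int) : Bool :=
  IsMeanLoopA (x * n - arr.sum) k PySem.Set.empty arr

-- ===== PORT B =====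
-- B's while loop. Indexing b[lo]/b[hi] is done with getD: inside the loop 0 ≤ lo < hi ≤ len(b)-1,
-- so both indices are in range and getD is exact; with b = [] Python sets hi = -1 and the loop is
-- never entered, matched here by Nat subtraction giving hi = 0 and the guard lo < hi failing.
def IsMeanTwoPtr (target : Int) (b : List Int) (lo hi : Nat) : Bool :=
  if h : lo < hi then
    let s := b.getD lo 0 + b.getD hi 0
    if s = target then true
    else if s < target then IsMeanTwoPtr target b (lo + 1) hi
    else IsMeanTwoPtr target b lo (hi - 1)
  else false
  termination_by hi - lo
  decreasing_by all_goals omega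

def IsMean_alt (n : Int) (k : Int) (x : Int) (arr : List Int) : Bool :=
  let target := x * n - arr.sum
  let b := PySem.List.sorted (arr.map (fun v => v * (k - 1))) (fun v => v) false
  IsMeanTwoPtr target b 0 (b.length - 1)

-- ===== PRECONDITION & SPEC =====
def Spec_IsMean (n : Int) (k : Int) (x : Int) (arr : List Int) (out : Bool) : Prop := out = IsMean_alt n k x arr
instance (n : Int) (k : Int) (x : Int) (arr : List Int) (out : Bool) : Decidable (Spec_IsMean n k x arr out) := by unfold Spec_IsMean; infer_instance

-- ===== CLAIM (what is proved, stated in full; the proofs are below) =====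
def Claim_equal_IsMean : Prop := ∀ (n : Int) (k : Int) (x : Int) (arr : List Int), Dom_IsMean n k x arr → Spec_IsMean n k x arr (IsMean n k x arr)

-- ===== LEMMAS AND PROOFS =====

-- proof-side helper: brute-force pair scan, the intermediate characterisation of both ports
def pairScan (t : Int) : List Int → Bool
  | [] => false
  | u :: rest => (rest.any fun w => u + w == t) || pairScan t rest

-- "two distinct positions sum to t", in a permutation-invariant form
def HasPair (t : Int) (l : List Int) : Prop := ∃ x ∈ l, (t - x) ∈ l.erase x

-- the same property in index form
def IdxPair (t : Int) (l : List Int) : Prop :=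
  ∃ i j : Nat, i < j ∧ j < l.length ∧ l.getD i 0 + l.getD j 0 = t

lemma IsMeanLoopA_eq (t c : Int) (l : List Int) : ∀ pre : PySem.Set Int,
    IsMeanLoopA t c pre l =
      (l.any (fun v => decide ((t - v * (c - 1)) ∈ pre))
        || pairScan t (l.map (fun v => v * (c - 1)))) := by
  induction l with
  | nil => intro pre; simp [IsMeanLoopA, pairScan]
  | cons v rest ih =>
    intro pre
    by_cases h : (t - v * (c - 1)) ∈ pre
    · simp [IsMeanLoopA, h]
    · simp only [IsMeanLoopA, if_neg h, ih, List.map_cons, pairScan, List.any_map,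
        List.any_cons]
      rw [Bool.eq_iff_iff]
      simp only [Bool.or_eq_true, List.any_eq_true, PySem.Set.mem_add, decide_eq_true_eq,
        beq_iff_eq, Function.comp]
      constructor
      · rintro (⟨w, hw, hmem | heq⟩ | hb)
        · exact Or.inl (Or.inr ⟨w, hw, hmem⟩)
        · exact Or.inr (Or.inl ⟨w, hw, by linarith⟩)
        · exact Or.inr (Or.inr hb)
      · rintro ((hmem | ⟨w, hw, hm⟩) | ⟨w, hw, he⟩ | hb)
        · exact absurd hmem h
        · exact Or.inl ⟨w, hw, Or.inl hm⟩
        · exact Or.inl ⟨w, hw, Or.inr (by linarith)⟩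
        · exact Or.inr hb

lemma HasPair_cons (t u : Int) (rest : List Int) :
    HasPair t (u :: rest) ↔ (t - u) ∈ rest ∨ HasPair t rest := by
  constructor
  · rintro ⟨y, hy, hz⟩
    rcases List.mem_cons.mp hy with rfl | hy'
    · rw [List.erase_cons_head] at hz; exact Or.inl hz
    · by_cases hu : u = y
      · subst hu; rw [List.erase_cons_head] at hz; exact Or.inl hz
      · rw [List.erase_cons_tail (by simpa using hu)] at hz
        rcases List.mem_cons.mp hz with he | hz'
        · refine Or.inl ?_
          have hyy : y = t - u := by omega
          rw [← hyy]; exact hy'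
        · exact Or.inr ⟨y, hy', hz'⟩
  · rintro (h | ⟨y, hy, hz⟩)
    · exact ⟨u, List.mem_cons_self, by rw [List.erase_cons_head]; exact h⟩
    · refine ⟨y, List.mem_cons_of_mem _ hy, ?_⟩
      by_cases hu : u = y
      · subst hu; rw [List.erase_cons_head]; exact List.mem_of_mem_erase hz
      · rw [List.erase_cons_tail (by simpa using hu)]
        exact List.mem_cons_of_mem _ hz

lemma HasPair_perm {t : Int} {l l' : List Int} (p : l.Perm l') :
    HasPair t l ↔ HasPair t l' := by
  constructor
  · rintro ⟨y, hy, hz⟩; exact ⟨y, p.mem_iff.mp hy, (p.erase y).mem_iff.mp hz⟩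
  · rintro ⟨y, hy, hz⟩; exact ⟨y, p.mem_iff.mpr hy, (p.erase y).mem_iff.mpr hz⟩

lemma pairScan_iff (t : Int) (l : List Int) : pairScan t l = true ↔ HasPair t l := by
  induction l with
  | nil => simp [pairScan, HasPair]
  | cons u rest ih =>
    rw [HasPair_cons, ← ih]
    simp only [pairScan, Bool.or_eq_true, List.any_eq_true, beq_iff_eq]
    constructor
    · rintro (⟨w, hw, he⟩ | hb)
      · refine Or.inl ?_
        have hww : w = t - u := by omega
        rw [← hww]; exact hw
      · exact Or.inr hb
    · rintro (h | hb)
      · exact Or.inl ⟨t - u, h, by omega⟩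
      · exact Or.inr hb

lemma IdxPair_iff (t : Int) (l : List Int) : pairScan t l = true ↔ IdxPair t l := by
  induction l with
  | nil => simp [pairScan, IdxPair]
  | cons u rest ih =>
    simp only [pairScan, Bool.or_eq_true, List.any_eq_true, beq_iff_eq, ih]
    constructor
    · rintro (⟨w, hw, he⟩ | ⟨i, j, hij, hj, hs⟩)
      · obtain ⟨j, hj, rfl⟩ := List.mem_iff_getElem.mp hw
        refine ⟨0, j + 1, by omega, by simpa using by omega, ?_⟩
        simp only [List.getD_cons_zero, List.getD_cons_succ]
        rw [List.getD_eq_getElem _ _ hj]; exact he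
      · exact ⟨i + 1, j + 1, by omega, by simpa using by omega,
          by simpa [List.getD_cons_succ] using hs⟩
    · rintro ⟨i, j, hij, hj, hs⟩
      rcases i with _ | i
      · rcases j with _ | j
        · omega
        · refine Or.inl ⟨rest.getD j 0, ?_, ?_⟩
          · have hj' : j < rest.length := by simpa using hj
            rw [List.getD_eq_getElem _ _ hj']; exact List.getElem_mem hj'
          · simpa [List.getD_cons_succ] using hs
      · rcases j with _ | j
        · omega
        · exact Or.inr ⟨i, j, by omega, by simpa using hj,
            by simpa [List.getD_cons_succ] using hs⟩

lemma twoPtr_iff (t : Int) (b : List Int)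
    (hmono : ∀ p q : Nat, p ≤ q → q < b.length → b.getD p 0 ≤ b.getD q 0) :
    ∀ (d lo hi : Nat), hi - lo ≤ d → hi < b.length →
      (IsMeanTwoPtr t b lo hi = true ↔
        ∃ i j : Nat, lo ≤ i ∧ i < j ∧ j ≤ hi ∧ b.getD i 0 + b.getD j 0 = t) := by
  intro d
  induction d with
  | zero =>
    intro lo hi hd _
    rw [IsMeanTwoPtr]
    have : ¬ lo < hi := by omega
    simp only [dif_neg this]
    constructor
    · intro h; cases h
    · rintro ⟨i, j, h1, h2, h3, _⟩; omega
  | succ d ihd =>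
    intro lo hi hd hhi
    by_cases h : lo < hi
    · rw [IsMeanTwoPtr]
      simp only [dif_pos h]
      by_cases he : b.getD lo 0 + b.getD hi 0 = t
      · simp only [if_pos he]
        constructor
        · intro _; exact ⟨lo, hi, le_refl _, h, le_refl _, he⟩
        · intro _; trivial
      · simp only [if_neg he]
        by_cases hlt : b.getD lo 0 + b.getD hi 0 < t
        · simp only [if_pos hlt]
          rw [ihd (lo + 1) hi (by omega) hhi]
          constructor
          · rintro ⟨i, j, h1, h2, h3, h4⟩; exact ⟨i, j, by omega, h2, h3, h4⟩
          · rintro ⟨i, j, h1, h2, h3, h4⟩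
            refine ⟨i, j, ?_, h2, h3, h4⟩
            rcases Nat.lt_or_ge lo i with hi' | hi'
            · omega
            · -- i = lo is impossible: b[j] ≤ b[hi], so the sum is < t
              have hieq : i = lo := by omega
              have : b.getD j 0 ≤ b.getD hi 0 := hmono j hi h3 hhi
              subst hieq; omega
        · simp only [if_neg hlt]
          have hgt : t < b.getD lo 0 + b.getD hi 0 := by omega
          rw [ihd lo (hi - 1) (by omega) (by omega)]
          constructor
          · rintro ⟨i, j, h1, h2, h3, h4⟩; exact ⟨i, j, h1, h2, by omega, h4⟩
          · rintro ⟨i, j, h1, h2, h3, h4⟩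
            refine ⟨i, j, h1, h2, ?_, h4⟩
            rcases Nat.lt_or_ge j hi with hj' | hj'
            · omega
            · -- j = hi is impossible: b[i] ≥ b[lo], so the sum is > t
              have hjeq : j = hi := by omega
              have : b.getD lo 0 ≤ b.getD i 0 := hmono lo i h1 (by omega)
              subst hjeq; omega
    · rw [IsMeanTwoPtr]
      simp only [dif_neg h]
      constructor
      · intro hf; cases hf
      · rintro ⟨i, j, h1, h2, h3, _⟩; omega

-- ===== VERDICT (by name: the statement is the Claim_ definition above) =====
theorem IsMean_spec : Claim_equal_IsMean := by
  intro n k x arr _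
  unfold Spec_IsMean IsMean IsMean_alt
  rw [IsMeanLoopA_eq]
  set t := x * n - arr.sum with ht
  set m := arr.map (fun v => v * (k - 1)) with hm
  set b := PySem.List.sorted m (fun v => v) false with hb
  have hperm : b.Perm m := PySem.List.sorted_perm m (fun v => v) false
  rw [Bool.eq_iff_iff]
  by_cases hb0 : b.length = 0
  · have hbnil : b = [] := List.length_eq_zero_iff.mp hb0
    have hmnil : m = [] := List.length_eq_zero_iff.mp (by rw [← hperm.length_eq]; exact hb0)
    rw [hbnil, hmnil]
    simp [pairScan, IsMeanTwoPtr, PySem.Set.empty]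
  · have hmono : ∀ p q : Nat, p ≤ q → q < b.length → b.getD p 0 ≤ b.getD q 0 := by
      intro p q hpq hq
      rw [List.getD_eq_getElem _ _ (lt_of_le_of_lt hpq hq), List.getD_eq_getElem _ _ hq]
      exact PySem.List.sorted_id_getElem_mono m hpq hq
    have h1 : pairScan t m = true ↔ HasPair t b :=
      (pairScan_iff t m).trans (HasPair_perm hperm).symm
    have h2 : IsMeanTwoPtr t b 0 (b.length - 1) = true ↔ HasPair t b := by
      rw [twoPtr_iff t b hmono (b.length - 1) 0 (b.length - 1) (le_refl _) (by omega)]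
      rw [← pairScan_iff, IdxPair_iff]
      unfold IdxPair
      constructor
      · rintro ⟨i, j, _, h2, h3, h4⟩; exact ⟨i, j, h2, by omega, h4⟩
      · rintro ⟨i, j, h2, h3, h4⟩; exact ⟨i, j, by omega, h2, by omega, h4⟩
    rw [h2, ← h1]
    simp [PySem.Set.empty]
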